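-- pv_equiv track=rewrite | github.com/PoojaSingh31github/DSA-Practice | unit4/DSA/backtracking/practce/swanandTrek.py | solve
-- ===== SOURCE A (Python) =====
-- def findDirection(n, mat, px, py, prev):
--   curr_pos = [px, py]
--   min_val = float('inf')
--
--   if px - 1 >= 0 and mat[px - 1][py] > prev:
--     curr_pos = [px - 1, py]
--     min_val = mat[px - 1][py]
--
--   if px + 1 < n and mat[px + 1][py] > prev and mat[px + 1][py] < min_val:
--     curr_pos = [px + 1, py]
--     min_val = mat[px + 1][py]
--
--   if py + 1 < n and mat[px][py + 1] > prev and mat[px][py + 1] < min_val: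
--     curr_pos = [px, py + 1]
--     min_val = mat[px][py + 1]
--
--   if py - 1 >= 0 and mat[px][py - 1] > prev and mat[px][py - 1] < min_val:
--     curr_pos = [px, py - 1]
--     min_val = mat[px][py - 1]
--
--   return curr_pos
--
-- def solve(n, mat, px, py, prev, path):
--   if px < 0 or py < 0 or px >= n or py >= n or mat[px][py] <= prev:
--     return "-1"
--
--   path += str(mat[px][py]) + " "
--   curr_pos = findDirection(n, mat, px, py, mat[px][py])
--
--   if curr_pos[0] == px and curr_pos[1] == py:
--     return path.strip()
--
--   return solve(n, mat, curr_pos[0], curr_pos[1], mat[px][py], path)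
-- ===== SOURCE B (Python) =====
-- def solve(n, mat, px, py, prev, path):
--     if px < 0 or py < 0 or px >= n or py >= n or mat[px][py] <= prev:
--         return "-1"
--     x, y = px, py
--     out = path
--     while True:
--         v = mat[x][y]
--         out += str(v) + " "
--         best = None
--         nxt = None
--         for dx, dy in ((-1, 0), (1, 0), (0, 1), (0, -1)):
--             nx, ny = x + dx, y + dy
--             if 0 <= nx < n and 0 <= ny < n:
--                 w = mat[nx][ny]
--                 if w > v and (best is None or w < best):
--                     best = w
--                     nxt = (nx, ny)
--         if nxt is None:
--             return out.strip()
--         x, y = nxt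
-- ===== Notes on version B (the rewrite author's own statement) =====
-- stated objective: simpler
-- what changed: Replaced A's recursion with helper findDirection (four hand-written neighbor if-blocks and a float('inf') sentinel) by a single iterative while loop that scans the four directions with a data-driven for loop and a best-so-far accumulator, appending to the result string as it walks.
-- outside the precondition, e.g. on solve(2, [[1, 2], [0, 3], [99]], 0, 0, 0, ''): A returns '1 2 3', B returns '1 2 3'
import Mathlib
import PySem

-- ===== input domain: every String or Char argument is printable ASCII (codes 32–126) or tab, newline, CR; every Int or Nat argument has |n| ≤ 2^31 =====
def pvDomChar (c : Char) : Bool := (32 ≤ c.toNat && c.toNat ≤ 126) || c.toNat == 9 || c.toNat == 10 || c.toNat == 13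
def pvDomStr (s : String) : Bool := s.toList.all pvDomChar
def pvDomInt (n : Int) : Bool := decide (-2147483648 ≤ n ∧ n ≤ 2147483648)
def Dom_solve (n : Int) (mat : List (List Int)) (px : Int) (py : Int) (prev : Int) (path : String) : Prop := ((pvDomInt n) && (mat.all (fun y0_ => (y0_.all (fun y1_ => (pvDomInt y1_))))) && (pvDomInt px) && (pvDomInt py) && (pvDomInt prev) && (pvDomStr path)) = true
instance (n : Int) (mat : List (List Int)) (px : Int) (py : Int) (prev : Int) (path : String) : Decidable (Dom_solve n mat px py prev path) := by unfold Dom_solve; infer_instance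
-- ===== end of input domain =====

-- B replaces A's recursion + four hand-written neighbor if-blocks by a single iterative
-- loop whose neighbor scan folds over a direction list with a best-so-far accumulator
-- (objective: simpler / more idiomatic; same greedy result; return value only).

-- mat[i][j]; the default 0 is never reached on inputs admitted by Pre_solve (Python raises there)
def pvGet2 (mat : List (List Int)) (i j : Int) : Int :=
  ((PySem.List.pyGet? mat i).bind (fun r => PySem.List.pyGet? r j)).getD 0

-- termination measure: number of matrix entries ≥ c, plus one if c ≤ 0 (covers the pvGet2 default)
def pvMu (mat : List (List Int)) (c : Int) : Nat :=
  (mat.flatten.filter (fun t => decide (c ≤ t))).length + (if c ≤ 0 then 1 else 0)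

theorem pvGet2_mem_or_zero (mat : List (List Int)) (i j : Int) :
    pvGet2 mat i j ∈ mat.flatten ∨ pvGet2 mat i j = 0 := by
  unfold pvGet2
  cases hr : PySem.List.pyGet? mat i with
  | none => right; rfl
  | some r =>
    cases hv : PySem.List.pyGet? r j with
    | none => right; simp [hv]
    | some v =>
      left
      have hrm := PySem.List.mem_of_pyGet?_eq_some mat hr
      have hvm := PySem.List.mem_of_pyGet?_eq_some r hv
      simp only [hv, Option.bind_some, Option.getD_some]
      exact List.mem_flatten.2 ⟨r, hrm, hvm⟩

theorem pv_filter_lt {l : List Int} {p q : Int → Bool}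
    (himp : ∀ x, q x = true → p x = true) {e : Int} (he : e ∈ l)
    (hp : p e = true) (hq : q e = false) :
    (l.filter q).length < (l.filter p).length := by
  induction l with
  | nil => cases he
  | cons h t ih =>
    have hmono : (t.filter q).length ≤ (t.filter p).length :=
      (List.monotone_filter_right t himp).length_le
    rcases List.mem_cons.1 he with rfl | hmem
    · simp [List.filter, hp, hq]; omega
    · have hlt := ih hmem
      cases hqh : q h
      · cases hph : p h <;> simp [List.filter, hqh, hph] <;> omega
      · have hph := himp h hqh
        simp [List.filter, hqh, hph]; omega

theorem pvMu_lt (mat : List (List Int)) {c c' e : Int} (h1 : c ≤ e) (h2 : e < c')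
    (he : e ∈ mat.flatten ∨ e = 0) : pvMu mat c' < pvMu mat c := by
  unfold pvMu
  have hmono : ((mat.flatten.filter (fun t => decide (c' ≤ t))).length)
      ≤ ((mat.flatten.filter (fun t => decide (c ≤ t))).length) :=
    (List.monotone_filter_right mat.flatten (fun a h => by
      simp only [decide_eq_true_eq] at *; omega)).length_le
  rcases he with hmem | rfl
  · have hstrict := pv_filter_lt (l := mat.flatten)
      (p := fun t => decide (c ≤ t)) (q := fun t => decide (c' ≤ t))
      (fun x hx => by simp only [decide_eq_true_eq] at *; omega) hmem
      (by simp only [decide_eq_true_eq]; omega)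
      (by simp only [decide_eq_false_iff_not]; omega)
    have h1 : (if c' ≤ 0 then (1 : Nat) else 0) ≤ (if c ≤ 0 then 1 else 0) := by
      split_ifs <;> omega
    exact Nat.add_lt_add_of_lt_of_le hstrict h1
  · have hc : c ≤ 0 := h1
    have hc' : ¬ c' ≤ 0 := by omega
    rw [if_neg hc', if_pos hc, Nat.add_zero]
    exact Nat.lt_succ_of_le hmono

-- ===== PORT A =====
-- Python's float('inf') min_val is an Option Int (none = inf)
def ltMin (w : Int) (mv : Option Int) : Bool :=
  match mv with
  | none => true
  | some m => decide (w < m)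

def findDirection (n : Int) (mat : List (List Int)) (px : Int) (py : Int) (prev : Int) : Int × Int :=
  let cm : (Int × Int) × Option Int := ((px, py), none)
  let cm := if 0 ≤ px - 1 ∧ prev < pvGet2 mat (px - 1) py then
      ((px - 1, py), some (pvGet2 mat (px - 1) py)) else cm
  let cm := if px + 1 < n ∧ prev < pvGet2 mat (px + 1) py ∧ ltMin (pvGet2 mat (px + 1) py) cm.2 = true then
      ((px + 1, py), some (pvGet2 mat (px + 1) py)) else cm
  let cm := if py + 1 < n ∧ prev < pvGet2 mat px (py + 1) ∧ ltMin (pvGet2 mat px (py + 1)) cm.2 = true then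
      ((px, py + 1), some (pvGet2 mat px (py + 1))) else cm
  let cm := if 0 ≤ py - 1 ∧ prev < pvGet2 mat px (py - 1) ∧ ltMin (pvGet2 mat px (py - 1)) cm.2 = true then
      ((px, py - 1), some (pvGet2 mat px (py - 1))) else cm
  cm.1

def solve (n : Int) (mat : List (List Int)) (px : Int) (py : Int) (prev : Int) (path : String) : String :=
  if px < 0 ∨ py < 0 ∨ px ≥ n ∨ py ≥ n ∨ pvGet2 mat px py ≤ prev then "-1"
  else
    let path2 := path ++ PySem.Int.toStr (pvGet2 mat px py) ++ " "
    let c := findDirection n mat px py (pvGet2 mat px py)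
    if c.1 = px ∧ c.2 = py then PySem.Str.strip path2
    else solve n mat c.1 c.2 (pvGet2 mat px py) path2
termination_by pvMu mat (prev + 1)
decreasing_by
  exact pvMu_lt mat (by omega) (by omega) (pvGet2_mem_or_zero mat px py)

-- ===== PORT B =====
-- the body of B's for-loop over the four directions; best = acc.map (·.1), nxt = acc.map (·.2)
def stepBf (n : Int) (mat : List (List Int)) (x : Int) (y : Int) (v : Int)
    (acc : Option (Int × Int × Int)) (d : Int × Int) : Option (Int × Int × Int) :=
  let nx := x + d.1
  let ny := y + d.2
  if 0 ≤ nx ∧ nx < n ∧ 0 ≤ ny ∧ ny < n then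
    if v < pvGet2 mat nx ny ∧ ltMin (pvGet2 mat nx ny) (acc.map (·.1)) = true then
      some (pvGet2 mat nx ny, nx, ny)
    else acc
  else acc

def stepB (n : Int) (mat : List (List Int)) (x : Int) (y : Int) (v : Int) : Option (Int × Int × Int) :=
  [((-1 : Int), (0 : Int)), (1, 0), (0, 1), (0, -1)].foldl (stepBf n mat x y v) none

-- invariant of the direction fold (cited by loopB's decreasing_by)
theorem pv_foldl_inv {α β : Type} (f : α → β → α) (P : α → Prop)
    (hstep : ∀ a b, P a → P (f a b)) : ∀ (l : List β) (a : α), P a → P (l.foldl f a) := by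
  intro l
  induction l with
  | nil => intro a ha; exact ha
  | cons b t ih => intro a ha; exact ih (f a b) (hstep a b ha)

theorem stepB_some {n : Int} {mat : List (List Int)} {x y v w nx ny : Int}
    (h : stepB n mat x y v = some (w, nx, ny)) :
    w = pvGet2 mat nx ny ∧ v < w ∧ 0 ≤ nx ∧ nx < n ∧ 0 ≤ ny ∧ ny < n := by
  have hinv := pv_foldl_inv (stepBf n mat x y v)
    (fun acc => ∀ w nx ny, acc = some (w, nx, ny) →
      w = pvGet2 mat nx ny ∧ v < w ∧ 0 ≤ nx ∧ nx < n ∧ 0 ≤ ny ∧ ny < n)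
    (by
      intro acc d hacc w nx ny hw
      unfold stepBf at hw
      simp only [] at hw
      split_ifs at hw with h1 h2
      · obtain ⟨rfl, rfl, rfl⟩ := by simpa using hw
        exact ⟨rfl, h2.1, h1.1, h1.2.1, h1.2.2.1, h1.2.2.2⟩
      · exact hacc w nx ny hw
      · exact hacc w nx ny hw)
    [((-1 : Int), (0 : Int)), (1, 0), (0, 1), (0, -1)] none
    (by intro w nx ny h; cases h)
  exact hinv w nx ny h

def loopB (n : Int) (mat : List (List Int)) (x : Int) (y : Int) (out : String) : String :=
  let v := pvGet2 mat x y
  let out2 := out ++ PySem.Int.toStr v ++ " "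
  match h : stepB n mat x y v with
  | none => PySem.Str.strip out2
  | some (_w, nx, ny) => loopB n mat nx ny out2
termination_by pvMu mat (pvGet2 mat x y)
decreasing_by
  exact pvMu_lt mat (le_refl _)
    (by obtain ⟨h1, h2, -⟩ := stepB_some h; omega)
    (pvGet2_mem_or_zero mat x y)

def solve_alt (n : Int) (mat : List (List Int)) (px : Int) (py : Int) (prev : Int) (path : String) : String :=
  if px < 0 ∨ py < 0 ∨ px ≥ n ∨ py ≥ n ∨ pvGet2 mat px py ≤ prev then "-1"
  else loopB n mat px py path

-- ===== PRECONDITION & SPEC =====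
-- Pre_ excludes inputs whose start cell is inside [0,n)² but whose matrix does not contain a
-- full n×n grid: there Python A's chained indexing raises IndexError on almost every such
-- input (and on the rare ones whose greedy walk avoids every missing cell A and B return the
-- same string; see cites).
def Pre_solve (n : Int) (mat : List (List Int)) (px : Int) (py : Int) (prev : Int) (path : String) : Prop :=
  px < 0 ∨ py < 0 ∨ px ≥ n ∨ py ≥ n ∨ (n ≤ (mat.length : Int) ∧ ∀ r ∈ mat, n ≤ (r.length : Int))
instance (n : Int) (mat : List (List Int)) (px : Int) (py : Int) (prev : Int) (path : String) : Decidable (Pre_solve n mat px py prev path) := by unfold Pre_solve; infer_instance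

def pvWitness_solve : Int × List (List Int) × Int × Int × Int × String := (2, [[1, 2], [4, 3]], 0, 0, 0, "")

def Spec_solve (n : Int) (mat : List (List Int)) (px : Int) (py : Int) (prev : Int) (path : String) (out : String) : Prop := out = solve_alt n mat px py prev path
instance (n : Int) (mat : List (List Int)) (px : Int) (py : Int) (prev : Int) (path : String) (out : String) : Decidable (Spec_solve n mat px py prev path out) := by unfold Spec_solve; infer_instance

-- ===== CLAIM (what is proved, stated in full; the proofs are below) =====
def Claim_equal_solve : Prop := ∀ (n : Int) (mat : List (List Int)) (px : Int) (py : Int) (prev : Int) (path : String), Dom_solve n mat px py prev path → Pre_solve n mat px py prev path → Spec_solve n mat px py prev path (solve n mat px py prev path)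

-- ===== LEMMAS AND PROOFS =====

-- correspondence between A's (curr_pos, min_val) pair and B's best-so-far accumulator
def AB (x y : Int) (cm : (Int × Int) × Option Int) (acc : Option (Int × Int × Int)) : Prop :=
  cm.2 = acc.map (·.1) ∧ (acc = none → cm.1 = (x, y)) ∧
    ∀ w nx ny, acc = some (w, nx, ny) → cm.1 = (nx, ny)

theorem stage_corr (n : Int) (mat : List (List Int)) (x y v nx ny : Int) (d : Int × Int)
    (hnx : x + d.1 = nx) (hny : y + d.2 = ny)
    (P : Prop) [dP : Decidable P] (hPQ : P ↔ (0 ≤ nx ∧ nx < n ∧ 0 ≤ ny ∧ ny < n))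
    (cm : (Int × Int) × Option Int) (acc : Option (Int × Int × Int)) (hAB : AB x y cm acc) :
    AB x y (if P ∧ v < pvGet2 mat nx ny ∧ ltMin (pvGet2 mat nx ny) cm.2 = true then
              ((nx, ny), some (pvGet2 mat nx ny)) else cm)
           (stepBf n mat x y v acc d) := by
  obtain ⟨hm, hnone, hsome⟩ := hAB
  unfold stepBf
  simp only [hnx, hny]
  rw [hm]
  by_cases hq : 0 ≤ nx ∧ nx < n ∧ 0 ≤ ny ∧ ny < n
  · rw [if_pos hq]
    by_cases hv : v < pvGet2 mat nx ny ∧ ltMin (pvGet2 mat nx ny) (acc.map (·.1)) = true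
    · rw [if_pos hv, if_pos ⟨hPQ.2 hq, hv.1, hv.2⟩]
      refine ⟨rfl, fun h => by simp at h, fun w nx' ny' h => ?_⟩
      obtain ⟨rfl, rfl, rfl⟩ := by simpa using h
      rfl
    · rw [if_neg hv, if_neg (fun hA => hv ⟨hA.2.1, hA.2.2⟩)]
      exact ⟨hm, hnone, hsome⟩
  · rw [if_neg hq, if_neg (fun hA => hq (hPQ.1 hA.1))]
    exact ⟨hm, hnone, hsome⟩

theorem stage1_corr (n : Int) (mat : List (List Int)) (x y v : Int)
    (hxn : x < n) (hy0 : 0 ≤ y) (hyn : y < n) :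
    AB x y (if 0 ≤ x - 1 ∧ v < pvGet2 mat (x - 1) y then
              ((x - 1, y), some (pvGet2 mat (x - 1) y)) else ((x, y), none))
           (stepBf n mat x y v none (-1, 0)) := by
  unfold stepBf
  simp only [show x + (-1 : Int) = x - 1 from rfl, add_zero, Option.map_none, ltMin]
  by_cases h1 : 0 ≤ x - 1
  · have hb : 0 ≤ x - 1 ∧ x - 1 < n ∧ 0 ≤ y ∧ y < n := ⟨h1, by omega, hy0, hyn⟩
    rw [if_pos hb]
    by_cases h2 : v < pvGet2 mat (x - 1) y
    · rw [if_pos (show (0 ≤ x - 1 ∧ v < pvGet2 mat (x - 1) y) from ⟨h1, h2⟩),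
          if_pos (show (v < pvGet2 mat (x - 1) y ∧ True) from ⟨h2, trivial⟩)]
      refine ⟨rfl, fun h => by simp at h, fun w nx' ny' h => ?_⟩
      obtain ⟨rfl, rfl, rfl⟩ := by simpa using h
      rfl
    · rw [if_neg (show ¬(0 ≤ x - 1 ∧ v < pvGet2 mat (x - 1) y) from fun h => h2 h.2),
          if_neg (show ¬(v < pvGet2 mat (x - 1) y ∧ True) from fun h => h2 h.1)]
      exact ⟨rfl, fun _ => rfl, fun w nx ny h => by simp at h⟩
  · rw [if_neg (show ¬(0 ≤ x - 1 ∧ v < pvGet2 mat (x - 1) y) from fun h => h1 h.1),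
        if_neg (show ¬(0 ≤ x - 1 ∧ x - 1 < n ∧ 0 ≤ y ∧ y < n) from fun h => h1 h.1)]
    exact ⟨rfl, fun _ => rfl, fun w nx ny h => by simp at h⟩

theorem step_findDir (n : Int) (mat : List (List Int)) (x y v : Int)
    (hx0 : 0 ≤ x) (hxn : x < n) (hy0 : 0 ≤ y) (hyn : y < n) :
    (stepB n mat x y v = none → findDirection n mat x y v = (x, y)) ∧
    (∀ w nx ny, stepB n mat x y v = some (w, nx, ny) → findDirection n mat x y v = (nx, ny)) := by
  have h1 := stage1_corr n mat x y v hxn hy0 hyn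
  have h2 := stage_corr n mat x y v (x + 1) y (1, 0) rfl (add_zero y)
    (P := x + 1 < n) ⟨fun h => ⟨by omega, h, hy0, hyn⟩, fun h => h.2.1⟩ _ _ h1
  have h3 := stage_corr n mat x y v x (y + 1) (0, 1) (add_zero x) rfl
    (P := y + 1 < n) ⟨fun h => ⟨hx0, hxn, by omega, h⟩, fun h => h.2.2.2⟩ _ _ h2
  have h4 := stage_corr n mat x y v x (y - 1) (0, -1) (add_zero x) rfl
    (P := 0 ≤ y - 1) ⟨fun h => ⟨hx0, hxn, h, by omega⟩, fun h => h.2.2.1⟩ _ _ h3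
  have hsB : stepB n mat x y v
      = stepBf n mat x y v (stepBf n mat x y v (stepBf n mat x y v
          (stepBf n mat x y v none (-1, 0)) (1, 0)) (0, 1)) (0, -1) := rfl
  constructor
  · intro hn
    exact h4.2.1 (by rw [← hsB]; exact hn)
  · intro w nx ny hs
    exact h4.2.2 w nx ny (by rw [← hsB]; exact hs)

theorem loopB_none {n : Int} {mat : List (List Int)} {x y : Int} (out : String)
    (h : stepB n mat x y (pvGet2 mat x y) = none) :
    loopB n mat x y out = PySem.Str.strip (out ++ PySem.Int.toStr (pvGet2 mat x y) ++ " ") := by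
  rw [loopB]
  split <;> simp_all

theorem loopB_some {n : Int} {mat : List (List Int)} {x y w nx ny : Int} (out : String)
    (h : stepB n mat x y (pvGet2 mat x y) = some (w, nx, ny)) :
    loopB n mat x y out = loopB n mat nx ny (out ++ PySem.Int.toStr (pvGet2 mat x y) ++ " ") := by
  rw [loopB]
  split <;> simp_all

theorem agree (n : Int) (mat : List (List Int)) :
    ∀ k x y prev path, pvMu mat (prev + 1) = k → 0 ≤ x → x < n → 0 ≤ y → y < n →
      prev < pvGet2 mat x y → solve n mat x y prev path = loopB n mat x y path := by
  intro k
  induction k using Nat.strong_induction_on with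
  | _ k IH =>
    intro x y prev path hk hx0 hxn hy0 hyn hv
    rw [solve]
    rw [if_neg (by push_neg; exact ⟨by omega, by omega, by omega, by omega, by omega⟩)]
    cases hstep : stepB n mat x y (pvGet2 mat x y) with
    | none =>
      have hfd := (step_findDir n mat x y (pvGet2 mat x y) hx0 hxn hy0 hyn).1 hstep
      rw [loopB_none path hstep, hfd, if_pos ⟨rfl, rfl⟩]
    | some p =>
      obtain ⟨w, nx, ny⟩ := p
      have hs := stepB_some hstep
      have hfd := (step_findDir n mat x y (pvGet2 mat x y) hx0 hxn hy0 hyn).2 w nx ny hstep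
      rw [loopB_some path hstep]
      simp only [hfd]
      rw [if_neg (by rintro ⟨rfl, rfl⟩; omega)]
      exact IH (pvMu mat (pvGet2 mat x y + 1))
        (by rw [← hk]; exact pvMu_lt mat (by omega) (by omega) (pvGet2_mem_or_zero mat x y))
        nx ny (pvGet2 mat x y) _ rfl hs.2.2.1 hs.2.2.2.1 hs.2.2.2.2.1 hs.2.2.2.2.2
        (by omega)

-- ===== VERDICT (by name: the statement is the Claim_ definition above) =====
theorem solve_spec : Claim_equal_solve := by
  intro n mat px py prev path _ _
  unfold Spec_solve solve_alt
  by_cases hg : px < 0 ∨ py < 0 ∨ px ≥ n ∨ py ≥ n ∨ pvGet2 mat px py ≤ prev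
  · rw [solve, if_pos hg, if_pos hg]
  · rw [if_neg hg]
    push_neg at hg
    exact agree n mat (pvMu mat (prev + 1)) px py prev path rfl (by omega) (by omega)
      (by omega) (by omega) (by omega)
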